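-- pv_equiv track=rewrite | github.com/jxiang1997/covid_pre_process | datasets/abstract_mammo_with_prior.py | get_image_paths_by_views
-- ===== SOURCE A (Python) =====
-- def get_image_paths_by_views(exam):
--     """
--     Get image paths of left and right CCs and MLOs
--
--     params: exam - a dictionary with views and png file paths
--
--     returns: 4 lists of image paths of each view by this order: left_ccs, left_mlos, right_ccs, right_mlos. Force max 1 image per view.
--     """
--
--     def get_view(view_name):
--         image_paths_w_view = [(view, image_path) for view, image_path in zip(exam['views'], exam['files']) if view.startswith(view_name)]
--
--         image_paths_w_view = image_paths_w_view[:1]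
--         image_paths = [path for _ , path in image_paths_w_view]
--         return image_paths
--
--     left_ccs = get_view('L CC')
--     left_mlos = get_view('L MLO')
--     right_ccs = get_view('R CC')
--     right_mlos = get_view('R MLO')
--
--     return left_ccs, left_mlos, right_ccs, right_mlos
-- ===== SOURCE B (Python) =====
-- def get_image_paths_by_views(exam):
--     """Single pass over zip(views, files), dispatching each pair to its view
--     bucket; a bucket keeps only the first path it receives (max 1 per view)."""
--     left_ccs, left_mlos, right_ccs, right_mlos = [], [], [], []
--     for view, path in zip(exam['views'], exam['files']):
--         if view.startswith('L CC'):
--             if not left_ccs: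
--                 left_ccs.append(path)
--         elif view.startswith('L MLO'):
--             if not left_mlos:
--                 left_mlos.append(path)
--         elif view.startswith('R CC'):
--             if not right_ccs:
--                 right_ccs.append(path)
--         elif view.startswith('R MLO'):
--             if not right_mlos:
--                 right_mlos.append(path)
--     return left_ccs, left_mlos, right_ccs, right_mlos
-- ===== Notes on version B (the rewrite author's own statement) =====
-- stated objective: faster
-- what changed: Replaces four separate filtered scans of zip(views, files) (one per view prefix) with a single pass that dispatches each pair into its bucket, keeping only the first path per view.
import Mathlib
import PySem

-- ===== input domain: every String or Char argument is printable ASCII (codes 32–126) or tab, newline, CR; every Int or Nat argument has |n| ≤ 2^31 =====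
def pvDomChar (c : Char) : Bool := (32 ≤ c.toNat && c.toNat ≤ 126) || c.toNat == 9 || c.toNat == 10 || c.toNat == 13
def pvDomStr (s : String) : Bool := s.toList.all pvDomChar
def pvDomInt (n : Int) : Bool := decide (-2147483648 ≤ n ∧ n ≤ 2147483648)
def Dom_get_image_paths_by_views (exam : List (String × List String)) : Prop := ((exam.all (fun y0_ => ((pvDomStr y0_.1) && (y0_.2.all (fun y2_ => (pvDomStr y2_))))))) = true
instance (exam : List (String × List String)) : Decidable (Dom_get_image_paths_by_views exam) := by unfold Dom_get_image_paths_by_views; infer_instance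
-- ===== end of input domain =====

-- B makes one dispatching pass over zip(views, files) instead of A's four filtered scans (one per view prefix).

-- ===== PORT A =====
-- inner helper get_view: filter zip by prefix, slice [:1], project paths
def pvGetView (pairs : List (String × String)) (viewName : String) : List String :=
  let image_paths_w_view := pairs.filter (fun vp => PySem.Str.startswith vp.1 viewName)
  let image_paths_w_view := PySem.List.slice image_paths_w_view none (some 1)
  image_paths_w_view.map (·.2)

def get_image_paths_by_views (exam : List (String × List String)) : List String × List String × List String × List String :=
  match (PySem.Dict.ofList exam).get? "views", (PySem.Dict.ofList exam).get? "files" with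
  | some views, some files =>
    let pairs := views.zip files
    let left_ccs := pvGetView pairs "L CC"
    let left_mlos := pvGetView pairs "L MLO"
    let right_ccs := pvGetView pairs "R CC"
    let right_mlos := pvGetView pairs "R MLO"
    (left_ccs, left_mlos, right_ccs, right_mlos)
  | _, _ => ([], [], [], [])   -- unreachable under Pre_ (KeyError in Python)

-- ===== PORT B =====
-- one dispatch step of B's loop: route the (view, path) pair to its bucket, keep only the first
def pvStep (st : List String × List String × List String × List String) (vp : String × String) :
    List String × List String × List String × List String :=
  match st with
  | (a, b, c, d) =>
    if PySem.Str.startswith vp.1 "L CC" then (if a.isEmpty then a ++ [vp.2] else a, b, c, d)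
    else if PySem.Str.startswith vp.1 "L MLO" then (a, if b.isEmpty then b ++ [vp.2] else b, c, d)
    else if PySem.Str.startswith vp.1 "R CC" then (a, b, if c.isEmpty then c ++ [vp.2] else c, d)
    else if PySem.Str.startswith vp.1 "R MLO" then (a, b, c, if d.isEmpty then d ++ [vp.2] else d)
    else (a, b, c, d)

def get_image_paths_by_views_alt (exam : List (String × List String)) : List String × List String × List String × List String :=
  match (PySem.Dict.ofList exam).get? "views" with
  | none => ([], [], [], [])   -- unreachable under Pre_ (KeyError in Python)
  | some views =>
    match (PySem.Dict.ofList exam).get? "files" with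
    | none => ([], [], [], [])   -- unreachable under Pre_ (KeyError in Python)
    | some files => (views.zip files).foldl pvStep ([], [], [], [])

-- ===== PRECONDITION & SPEC =====
-- Pre_ excludes exactly the inputs where Python raises KeyError: exam lacking the 'views' or 'files' key.
def Pre_get_image_paths_by_views (exam : List (String × List String)) : Prop :=
  ((PySem.Dict.ofList exam).get? "views").isSome ∧ ((PySem.Dict.ofList exam).get? "files").isSome
instance (exam : List (String × List String)) : Decidable (Pre_get_image_paths_by_views exam) := by
  unfold Pre_get_image_paths_by_views; infer_instance

def pvWitness_get_image_paths_by_views : (List (String × List String)) :=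
  [("views", ["L CC", "R MLO"]), ("files", ["p1.png", "p2.png"])]

def Spec_get_image_paths_by_views (exam : List (String × List String)) (out : List String × List String × List String × List String) : Prop := out = get_image_paths_by_views_alt exam
instance (exam : List (String × List String)) (out : List String × List String × List String × List String) : Decidable (Spec_get_image_paths_by_views exam out) := by unfold Spec_get_image_paths_by_views; infer_instance

-- ===== CLAIM (what is proved, stated in full; the proofs are below) =====
def Claim_equal_get_image_paths_by_views : Prop := ∀ (exam : List (String × List String)), Dom_get_image_paths_by_views exam → Pre_get_image_paths_by_views exam → Spec_get_image_paths_by_views exam (get_image_paths_by_views exam)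

-- ===== LEMMAS AND PROOFS =====

-- the "first matching path" characterisation shared by both sides
def pvFirst (p : String) (ps : List (String × String)) : List String :=
  ((ps.filter (fun vp => PySem.Str.startswith vp.1 p)).take 1).map (·.2)

def pvG (p : String) (acc : List String) (ps : List (String × String)) : List String :=
  if acc.isEmpty then pvFirst p ps else acc

-- two strings whose prefixes disagree at some position cannot both be prefixes of the same string
theorem pv_prefix_conflict {p q l : List Char} (i : Nat) (a b : Char)
    (ha : p[i]? = some a) (hb : q[i]? = some b) (hab : a ≠ b)
    (hp : p <+: l) : ¬ q <+: l := by
  intro hq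
  obtain ⟨t, rfl⟩ := hp
  obtain ⟨u, hu⟩ := hq
  have h1 : (p ++ t)[i]? = some a := by
    rw [List.getElem?_append_left (List.getElem?_eq_some_iff.mp ha).1]; exact ha
  have h2 : (p ++ t)[i]? = some b := by
    rw [← hu, List.getElem?_append_left (List.getElem?_eq_some_iff.mp hb).1]; exact hb
  exact hab (by simpa [h1] using h2)

theorem pv_excl {v : String} {p q : String} (i : Nat) (a b : Char)
    (ha : p.toList[i]? = some a) (hb : q.toList[i]? = some b) (hab : a ≠ b)
    (hp : PySem.Str.startswith v p = true) : PySem.Str.startswith v q = false := by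
  have hp' : p.toList <+: v.toList := (PySem.Chars.startswith_iff _ _).mp (by simpa using hp)
  have := pv_prefix_conflict i a b ha hb hab hp'
  by_contra h
  have hq : PySem.Str.startswith v q = true := by
    cases hsw : PySem.Str.startswith v q with
    | false => exact absurd hsw h
    | true => rfl
  exact this ((PySem.Chars.startswith_iff _ _).mp (by simpa using hq))

-- fold invariant: B's fold over ps from accumulators (a,b,c,d) is pvG componentwise
theorem pv_fold_eq (ps : List (String × String)) : ∀ a b c d : List String,
    ps.foldl pvStep (a, b, c, d) =
      (pvG "L CC" a ps, pvG "L MLO" b ps, pvG "R CC" c ps, pvG "R MLO" d ps) := by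
  induction ps with
  | nil =>
    intro a b c d
    simp only [List.foldl_nil, pvG, pvFirst, List.filter_nil, List.take_nil, List.map_nil]
    cases a <;> cases b <;> cases c <;> cases d <;> simp
  | cons x ps ih =>
    intro a b c d
    obtain ⟨v, pth⟩ := x
    by_cases h1 : PySem.Str.startswith v "L CC" = true
    · have e2 := pv_excl (p := "L CC") (q := "L MLO") 2 'C' 'M' (by decide) (by decide) (by decide) h1
      have e3 := pv_excl (p := "L CC") (q := "R CC") 0 'L' 'R' (by decide) (by decide) (by decide) h1
      have e4 := pv_excl (p := "L CC") (q := "R MLO") 0 'L' 'R' (by decide) (by decide) (by decide) h1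
      simp only [List.foldl_cons, pvStep, h1, if_true, ih]
      simp only [pvG, pvFirst, List.filter_cons, h1, e2, e3, e4]
      cases a <;> simp
    · by_cases h2 : PySem.Str.startswith v "L MLO" = true
      · have e3 := pv_excl (p := "L MLO") (q := "R CC") 0 'L' 'R' (by decide) (by decide) (by decide) h2
        have e4 := pv_excl (p := "L MLO") (q := "R MLO") 0 'L' 'R' (by decide) (by decide) (by decide) h2
        simp only [List.foldl_cons, pvStep, h1, h2, if_true, ih]
        simp only [pvG, pvFirst, List.filter_cons, h1, h2, e3, e4]
        cases b <;> simp
      · by_cases h3 : PySem.Str.startswith v "R CC" = true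
        · have e4 := pv_excl (p := "R CC") (q := "R MLO") 2 'C' 'M' (by decide) (by decide) (by decide) h3
          simp only [List.foldl_cons, pvStep, h1, h2, h3, if_true, ih]
          simp only [pvG, pvFirst, List.filter_cons, h1, h2, h3, e4]
          cases c <;> simp
        · by_cases h4 : PySem.Str.startswith v "R MLO" = true
          · simp only [List.foldl_cons, pvStep, h1, h2, h3, h4, if_true, ih]
            simp only [pvG, pvFirst, List.filter_cons, h1, h2, h3, h4]
            cases d <;> simp
          · simp only [List.foldl_cons, pvStep, h1, h2, h3, h4, ih]
            simp only [pvG, pvFirst, List.filter_cons]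
            simp at h1 h2 h3 h4
            simp [h1, h2, h3, h4]

-- A's get_view computes pvFirst
theorem pv_getView_eq (pairs : List (String × String)) (p : String) :
    pvGetView pairs p = pvFirst p pairs := by
  simp only [pvGetView, pvFirst]
  have : PySem.List.slice (pairs.filter (fun vp => PySem.Str.startswith vp.1 p)) none (some 1) =
      (pairs.filter (fun vp => PySem.Str.startswith vp.1 p)).take 1 := by
    simpa using PySem.List.slice_to_natCast (xs := pairs.filter (fun vp => PySem.Str.startswith vp.1 p)) (b := 1)
  rw [this]

-- ===== VERDICT (by name: the statement is the Claim_ definition above) =====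
theorem get_image_paths_by_views_spec : Claim_equal_get_image_paths_by_views := by
  intro exam _ h
  obtain ⟨hv, hf⟩ := h
  unfold Spec_get_image_paths_by_views get_image_paths_by_views get_image_paths_by_views_alt
  cases hvv : (PySem.Dict.ofList exam).get? "views" with
  | none => rw [hvv] at hv
  | some views =>
    cases hff : (PySem.Dict.ofList exam).get? "files" with
    | none => rw [hff] at hf
    | some files =>
      simp only []
      rw [pv_fold_eq]
      simp only [pv_getView_eq, pvG, List.isEmpty_nil, if_true]
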